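-- pv_equiv track=rewrite | github.com/justicemindsdev/justice-minds-website | COURT STATS/create_master_contacts.py | detect_role_from_email
-- ===== SOURCE A (Python) =====
-- def detect_role_from_email(email, institute):
--     """AI: Detect role from email domain and institute"""
--     email_lower = email.lower()
--     institute_lower = institute.lower() if institute else ''
--
--     # Parliament
--     if 'parliament.uk' in email_lower:
--         return 'MP (Member of Parliament)'
--
--     # Government
--     if '.gov.uk' in email_lower:
--         if 'homeoffice' in email_lower:
--             return 'Home Office Official'
--         elif 'justice' in email_lower or 'hmcts' in email_lower:
--             return 'Ministry of Justice Official'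
--         elif 'cps' in email_lower:
--             return 'Crown Prosecution Service'
--         elif 'liverpool.gov.uk' in email_lower:
--             return 'Liverpool Council Official'
--         elif 'westminster.gov.uk' in email_lower:
--             return 'Westminster Council Official'
--         return 'Government Official'
--
--     # Judiciary
--     if 'judiciary' in email_lower or 'judge' in institute_lower:
--         return 'Judge/Judicial Officer'
--
--     # Police
--     if 'police' in email_lower:
--         return 'Police Officer'
--
--     # NHS/Healthcare
--     if 'nhs' in email_lower or 'health' in institute_lower:
--         return 'Healthcare Professional'
--
--     # Legal
--     if any(term in email_lower or term in institute_lower for term in ['solicitor', 'barrister', 'legal', 'law.ac.uk']):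
--         return 'Legal Professional'
--
--     # Media
--     if any(term in email_lower for term in ['bbc', 'guardian', 'telegraph', 'times']):
--         return 'Media/Journalist'
--
--     # Academic
--     if '.ac.uk' in email_lower:
--         return 'Academic/Student'
--
--     # Advocacy/Support
--     if any(term in email_lower or term in institute_lower for term in ['advocacy', 'support', 'advice', 'healthwatch']):
--         return 'Advocacy/Support Services'
--
--     # Housing
--     if 'torus' in email_lower or 'housing' in institute_lower:
--         return 'Housing Services'
--
--     # Regulatory
--     if 'ombudsman' in email_lower or 'ico' in email_lower or 'cqc' in email_lower:
--         return 'Regulatory/Oversight'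
--
--     return 'Other'
-- ===== SOURCE B (Python) =====
-- # Rule-table re-implementation: an ordered list of (predicate, label) rules
-- # scanned once; first predicate that fires wins, falling back to 'Other'.
-- RULES = [
--     (lambda e, i: 'parliament.uk' in e,                          'MP (Member of Parliament)'),
--     (lambda e, i: '.gov.uk' in e and 'homeoffice' in e,          'Home Office Official'),
--     (lambda e, i: '.gov.uk' in e and ('justice' in e or 'hmcts' in e),
--                                                                  'Ministry of Justice Official'),
--     (lambda e, i: '.gov.uk' in e and 'cps' in e,                 'Crown Prosecution Service'),
--     (lambda e, i: 'liverpool.gov.uk' in e,                       'Liverpool Council Official'),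
--     (lambda e, i: 'westminster.gov.uk' in e,                     'Westminster Council Official'),
--     (lambda e, i: '.gov.uk' in e,                                'Government Official'),
--     (lambda e, i: 'judiciary' in e or 'judge' in i,              'Judge/Judicial Officer'),
--     (lambda e, i: 'police' in e,                                 'Police Officer'),
--     (lambda e, i: 'nhs' in e or 'health' in i,                   'Healthcare Professional'),
--     (lambda e, i: any(t in e or t in i for t in ('solicitor', 'barrister', 'legal', 'law.ac.uk')),
--                                                                  'Legal Professional'),
--     (lambda e, i: any(t in e for t in ('bbc', 'guardian', 'telegraph', 'times')),
--                                                                  'Media/Journalist'),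
--     (lambda e, i: '.ac.uk' in e,                                 'Academic/Student'),
--     (lambda e, i: any(t in e or t in i for t in ('advocacy', 'support', 'advice', 'healthwatch')),
--                                                                  'Advocacy/Support Services'),
--     (lambda e, i: 'torus' in e or 'housing' in i,                'Housing Services'),
--     (lambda e, i: 'ombudsman' in e or 'ico' in e or 'cqc' in e,  'Regulatory/Oversight'),
-- ]
--
--
-- def detect_role_from_email(email, institute):
--     e = email.lower()
--     i = institute.lower() if institute else ''
--     for pred, label in RULES:
--         if pred(e, i):
--             return label
--     return 'Other'
-- ===== Notes on version B (the rewrite author's own statement) =====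
-- stated objective: idiomatic
-- what changed: The inline if-cascade becomes a declarative ordered rules table of (predicate, label) pairs scanned by a single generic first-match loop, with the gov.uk sub-branches flattened into conjunctive rules placed before the catch-all '.gov.uk' rule.
import Mathlib
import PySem

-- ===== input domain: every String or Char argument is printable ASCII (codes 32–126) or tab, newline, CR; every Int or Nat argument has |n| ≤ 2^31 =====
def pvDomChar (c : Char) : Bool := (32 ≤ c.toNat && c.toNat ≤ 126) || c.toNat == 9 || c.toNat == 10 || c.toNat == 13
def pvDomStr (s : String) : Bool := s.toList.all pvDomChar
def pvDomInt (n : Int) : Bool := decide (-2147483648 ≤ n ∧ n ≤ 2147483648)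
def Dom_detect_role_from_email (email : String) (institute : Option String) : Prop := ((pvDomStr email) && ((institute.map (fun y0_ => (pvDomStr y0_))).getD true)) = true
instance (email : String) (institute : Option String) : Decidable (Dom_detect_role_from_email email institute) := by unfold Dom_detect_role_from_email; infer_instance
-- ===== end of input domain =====

-- B replaces A's inline if-cascade by a declarative ordered rules table scanned by one
-- generic first-match loop (objective: idiomatic); same return value everywhere.

-- ===== PORT A =====
def detect_role_from_email (email : String) (institute : Option String) : String :=
  let el := PySem.Str.lower email
  let il := match institute with
            | some s => if s = "" then "" else PySem.Str.lower s
            | none => ""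
  if PySem.Str.isIn "parliament.uk" el then "MP (Member of Parliament)"
  else if PySem.Str.isIn ".gov.uk" el then
    (if PySem.Str.isIn "homeoffice" el then "Home Office Official"
     else if PySem.Str.isIn "justice" el || PySem.Str.isIn "hmcts" el then "Ministry of Justice Official"
     else if PySem.Str.isIn "cps" el then "Crown Prosecution Service"
     else if PySem.Str.isIn "liverpool.gov.uk" el then "Liverpool Council Official"
     else if PySem.Str.isIn "westminster.gov.uk" el then "Westminster Council Official"
     else "Government Official")
  else if PySem.Str.isIn "judiciary" el || PySem.Str.isIn "judge" il then "Judge/Judicial Officer"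
  else if PySem.Str.isIn "police" el then "Police Officer"
  else if PySem.Str.isIn "nhs" el || PySem.Str.isIn "health" il then "Healthcare Professional"
  else if ["solicitor", "barrister", "legal", "law.ac.uk"].any (fun t => PySem.Str.isIn t el || PySem.Str.isIn t il) then "Legal Professional"
  else if ["bbc", "guardian", "telegraph", "times"].any (fun t => PySem.Str.isIn t el) then "Media/Journalist"
  else if PySem.Str.isIn ".ac.uk" el then "Academic/Student"
  else if ["advocacy", "support", "advice", "healthwatch"].any (fun t => PySem.Str.isIn t el || PySem.Str.isIn t il) then "Advocacy/Support Services"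
  else if PySem.Str.isIn "torus" el || PySem.Str.isIn "housing" il then "Housing Services"
  else if PySem.Str.isIn "ombudsman" el || PySem.Str.isIn "ico" el || PySem.Str.isIn "cqc" el then "Regulatory/Oversight"
  else "Other"

-- ===== PORT B =====
-- the ordered rules table of Source B: (predicate over (email_lower, institute_lower), label)
def pvRules : List ((String → String → Bool) × String) :=
  [ (fun e _ => PySem.Str.isIn "parliament.uk" e, "MP (Member of Parliament)"),
    (fun e _ => PySem.Str.isIn ".gov.uk" e && PySem.Str.isIn "homeoffice" e, "Home Office Official"),
    (fun e _ => PySem.Str.isIn ".gov.uk" e && (PySem.Str.isIn "justice" e || PySem.Str.isIn "hmcts" e), "Ministry of Justice Official"),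
    (fun e _ => PySem.Str.isIn ".gov.uk" e && PySem.Str.isIn "cps" e, "Crown Prosecution Service"),
    (fun e _ => PySem.Str.isIn "liverpool.gov.uk" e, "Liverpool Council Official"),
    (fun e _ => PySem.Str.isIn "westminster.gov.uk" e, "Westminster Council Official"),
    (fun e _ => PySem.Str.isIn ".gov.uk" e, "Government Official"),
    (fun e i => PySem.Str.isIn "judiciary" e || PySem.Str.isIn "judge" i, "Judge/Judicial Officer"),
    (fun e _ => PySem.Str.isIn "police" e, "Police Officer"),
    (fun e i => PySem.Str.isIn "nhs" e || PySem.Str.isIn "health" i, "Healthcare Professional"),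
    (fun e i => ["solicitor", "barrister", "legal", "law.ac.uk"].any (fun t => PySem.Str.isIn t e || PySem.Str.isIn t i), "Legal Professional"),
    (fun e _ => ["bbc", "guardian", "telegraph", "times"].any (fun t => PySem.Str.isIn t e), "Media/Journalist"),
    (fun e _ => PySem.Str.isIn ".ac.uk" e, "Academic/Student"),
    (fun e i => ["advocacy", "support", "advice", "healthwatch"].any (fun t => PySem.Str.isIn t e || PySem.Str.isIn t i), "Advocacy/Support Services"),
    (fun e i => PySem.Str.isIn "torus" e || PySem.Str.isIn "housing" i, "Housing Services"),
    (fun e _ => PySem.Str.isIn "ombudsman" e || PySem.Str.isIn "ico" e || PySem.Str.isIn "cqc" e, "Regulatory/Oversight") ]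

-- the generic first-match loop ('for pred, label in RULES: …')
def pvFirstMatch (rs : List ((String → String → Bool) × String)) (e i : String) : String :=
  match rs with
  | [] => "Other"
  | r :: rest => if r.1 e i then r.2 else pvFirstMatch rest e i

def detect_role_from_email_alt (email : String) (institute : Option String) : String :=
  let e := PySem.Str.lower email
  let i := match institute with
           | some s => if s = "" then "" else PySem.Str.lower s
           | none => ""
  pvFirstMatch pvRules e i

-- ===== PRECONDITION & SPEC =====
def Spec_detect_role_from_email (email : String) (institute : Option String) (out : String) : Prop := out = detect_role_from_email_alt email institute
instance (email : String) (institute : Option String) (out : String) : Decidable (Spec_detect_role_from_email email institute out) := by unfold Spec_detect_role_from_email; infer_instance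

-- ===== CLAIM (what is proved, stated in full; the proofs are below) =====
def Claim_equal_detect_role_from_email : Prop := ∀ (email : String) (institute : Option String), Dom_detect_role_from_email email institute → Spec_detect_role_from_email email institute (detect_role_from_email email institute)

-- ===== LEMMAS AND PROOFS =====

-- substring containment is transitive: anything containing the longer council domains contains ".gov.uk"
theorem pv_isIn_trans (a b s : String) (hab : PySem.Str.isIn a b = true)
    (hbs : PySem.Str.isIn b s = true) : PySem.Str.isIn a s = true := by
  rw [PySem.Str.isIn_iff_infix] at *
  exact hab.trans hbs

-- ===== VERDICT (by name: the statement is the Claim_ definition above) =====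
set_option maxHeartbeats 4000000 in
theorem detect_role_from_email_spec : Claim_equal_detect_role_from_email := by
  intro email institute _
  unfold Spec_detect_role_from_email detect_role_from_email detect_role_from_email_alt
  simp only
  set el := PySem.Str.lower email with hel
  set il := (match institute with
             | some s => if s = "" then "" else PySem.Str.lower s
             | none => "") with hil
  by_cases h1 : PySem.Str.isIn "parliament.uk" el = true
  · simp only [pvRules, pvFirstMatch, h1, if_true]
  · by_cases h2 : PySem.Str.isIn ".gov.uk" el = true
    · simp only [pvRules, pvFirstMatch, h1, h2, if_true, if_false,
        Bool.false_eq_true, Bool.true_and]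
    · have h5 : PySem.Str.isIn "liverpool.gov.uk" el = false := by
        cases hx : PySem.Str.isIn "liverpool.gov.uk" el
        · rfl
        · exact absurd (pv_isIn_trans _ _ _ (by decide) hx) h2
      have h6 : PySem.Str.isIn "westminster.gov.uk" el = false := by
        cases hx : PySem.Str.isIn "westminster.gov.uk" el
        · rfl
        · exact absurd (pv_isIn_trans _ _ _ (by decide) hx) h2
      simp only [pvRules, pvFirstMatch, h1, h2, h5, h6, if_false,
        Bool.false_eq_true, Bool.false_and]
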